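-- pv_equiv track=rewrite | github.com/rulitka/basic | 1.py | squirrel
-- ===== SOURCE A (Python) =====
-- def squirrel(N):
--     if N == 0:
--         return 1
--     else:
--         result = 1
--         for i in range(1, N + 1):
--             result *= i
--             first_number = int(str(abs(result))[0])
--         return first_number
-- ===== SOURCE B (Python) =====
-- def squirrel(N):
--     # First digit of N! via a balanced product tree over range(1, N+1).
--     def prod(lo, hi):
--         # product of the integers in range(lo, hi)
--         if hi - lo <= 0:
--             return 1
--         if hi - lo == 1:
--             return lo
--         mid = (lo + hi) // 2
--         return prod(lo, mid) * prod(mid, hi)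
--     return int(str(prod(1, N + 1))[0])
-- ===== Notes on version B (the rewrite author's own statement) =====
-- stated objective: faster
-- what changed: A builds the factorial by a left-to-right running product and converts the running value to a string on every iteration; B computes the product of range(1, N+1) with a balanced product tree (divide and conquer) and converts only the final value once.
import Mathlib
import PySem

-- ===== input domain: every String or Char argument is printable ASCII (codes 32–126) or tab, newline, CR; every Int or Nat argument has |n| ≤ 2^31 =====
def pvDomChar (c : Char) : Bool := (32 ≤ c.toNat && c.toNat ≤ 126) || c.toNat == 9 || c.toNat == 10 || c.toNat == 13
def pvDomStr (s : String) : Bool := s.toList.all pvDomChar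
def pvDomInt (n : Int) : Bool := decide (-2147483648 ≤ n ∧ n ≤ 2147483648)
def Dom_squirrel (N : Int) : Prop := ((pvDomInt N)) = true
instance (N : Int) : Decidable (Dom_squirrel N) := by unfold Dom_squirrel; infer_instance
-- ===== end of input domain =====

-- B replaces A's left-to-right running product (with a per-step str conversion)
-- by a balanced product tree over range(1, N+1) and a single final str; objective: faster.

-- ===== PORT A =====
-- int(str(abs(result))[0]); the `none` branch is Python's IndexError / ValueError, unreachable for str of an int
def firstDigitA (r : Int) : Int :=
  match PySem.Str.pyGet? (PySem.Int.toStr (if r < 0 then -r else r)) 0 with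
  | some c => (PySem.Int.ofChars? [c]).getD 0
  | none => 0

def squirrel (N : Int) : Int :=
  if N = 0 then 1
  else
    -- for i in range(1, N+1): result *= i; first_number = int(str(abs(result))[0])
    -- state = (result, first_number); first_number starts as the dummy 0 (unbound in Python, Pre_ keeps the loop nonempty)
    ((PySem.List.pyRange 1 (N + 1) 1).foldl
      (fun (st : Int × Int) i =>
        let result := st.1 * i
        (result, firstDigitA result)) (1, 0)).2

-- ===== PORT B =====
-- int(str(p)[0]); the `none` branch is unreachable for str of an int
def firstDigitB (r : Int) : Int :=
  match PySem.Str.pyGet? (PySem.Int.toStr r) 0 with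
  | some c => (PySem.Int.ofChars? [c]).getD 0
  | none => 0

-- product of range(lo, hi) by splitting at the midpoint
def prodRange (lo hi : Int) : Int :=
  if hi - lo ≤ 0 then 1
  else if hi - lo = 1 then lo
  else
    have hmid := PySem.Int.floordiv_eq_ediv_of_pos (a := lo + hi) (b := 2) (by omega)
    prodRange lo (PySem.Int.floordiv (lo + hi) 2) *
      prodRange (PySem.Int.floordiv (lo + hi) 2) hi
termination_by (hi - lo).toNat
decreasing_by
  · rw [hmid]; omega
  · rw [hmid]; omega

def squirrel_alt (N : Int) : Int :=
  firstDigitB (prodRange 1 (N + 1))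

-- ===== PRECONDITION & SPEC =====
-- For negative N the loop body never runs and A raises UnboundLocalError on `first_number`.
def Pre_squirrel (N : Int) : Prop := 0 ≤ N
instance (N : Int) : Decidable (Pre_squirrel N) := by unfold Pre_squirrel; infer_instance
def pvWitness_squirrel : Int := 5

def Spec_squirrel (N : Int) (out : Int) : Prop := out = squirrel_alt N
instance (N : Int) (out : Int) : Decidable (Spec_squirrel N out) := by unfold Spec_squirrel; infer_instance

-- ===== CLAIM (what is proved, stated in full; the proofs are below) =====
def Claim_equal_squirrel : Prop := ∀ (N : Int), Dom_squirrel N → Pre_squirrel N → Spec_squirrel N (squirrel N)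

-- ===== LEMMAS AND PROOFS =====

theorem firstDigit_eq {r : Int} (h : 0 ≤ r) : firstDigitA r = firstDigitB r := by
  simp [firstDigitA, firstDigitB, if_neg (not_lt.2 h)]

theorem prodRange_eq (lo hi : Int) : prodRange lo hi = (PySem.List.pyRange lo hi 1).prod := by
  generalize hn : (hi - lo).toNat = n
  induction n using Nat.strong_induction_on generalizing lo hi with
  | _ n ih =>
    rw [prodRange]
    by_cases h0 : hi - lo ≤ 0
    · rw [if_pos h0, PySem.List.pyRange_one_eq_nil (by omega)]; rfl
    · rw [if_neg h0]
      by_cases h1 : hi - lo = 1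
      · rw [if_pos h1, PySem.List.pyRange_one_cons (by omega),
            PySem.List.pyRange_one_eq_nil (by omega)]
        simp
      · rw [if_neg h1]
        have hmid := PySem.Int.floordiv_eq_ediv_of_pos (a := lo + hi) (b := 2) (by omega)
        have hb : lo < PySem.Int.floordiv (lo + hi) 2 ∧ PySem.Int.floordiv (lo + hi) 2 < hi := by
          rw [hmid]; omega
        rw [ih (PySem.Int.floordiv (lo + hi) 2 - lo).toNat (by omega) lo _ rfl,
            ih (hi - PySem.Int.floordiv (lo + hi) 2).toNat (by omega) _ hi rfl,
            PySem.List.pyRange_one_append lo (PySem.Int.floordiv (lo + hi) 2) hi (by omega) (by omega),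
            List.prod_append]

theorem foldA (l : List Int) (hl : l ≠ []) (r0 d0 : Int) :
    l.foldl (fun (st : Int × Int) i =>
        let result := st.1 * i
        (result, firstDigitA result)) (r0, d0)
      = (r0 * l.prod, firstDigitA (r0 * l.prod)) := by
  induction l generalizing r0 d0 with
  | nil => exact absurd rfl hl
  | cons x xs ih =>
    by_cases hxs : xs = []
    · subst hxs; simp
    · simp only [List.foldl_cons, List.prod_cons]
      rw [ih hxs]
      ring_nf

theorem one_le_prod (l : List Int) (h : ∀ x ∈ l, 1 ≤ x) : 1 ≤ l.prod := by
  induction l with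
  | nil => simp
  | cons x xs ih =>
    simp only [List.prod_cons]
    have hx := h x (List.mem_cons_self ..)
    have := ih (fun y hy => h y (List.mem_cons_of_mem _ hy))
    nlinarith

-- ===== VERDICT (by name: the statement is the Claim_ definition above) =====
theorem squirrel_spec : Claim_equal_squirrel := by
  intro N _ hpre
  unfold Spec_squirrel squirrel squirrel_alt
  by_cases h0 : N = 0
  · subst h0
    rw [if_pos rfl, prodRange]
    norm_num
    decide
  · rw [if_neg h0]
    have hne : PySem.List.pyRange 1 (N + 1) 1 ≠ [] := by
      rw [PySem.List.pyRange_one_cons (by unfold Pre_squirrel at hpre; omega)]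
      simp
    rw [foldA _ hne, prodRange_eq]
    have hprod : 1 ≤ (PySem.List.pyRange 1 (N + 1) 1).prod := by
      apply one_le_prod
      intro x hx
      have := (PySem.List.mem_pyRange_one).1 hx
      omega
    rw [one_mul]
    exact firstDigit_eq (by omega)
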